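-- pv_equiv track=rewrite | github.com/alvinwan/riot | train.py | create_samples
-- ===== SOURCE A (Python) =====
-- def create_samples(samples, cls, ordering):
--     X = []
--     Y = []
--
--     for sample in samples:
--         sample_macs = {network['mac'] for network in sample}
--         Y.append(cls)
--         X.append([int(mac in sample_macs) for mac in ordering])
--     return X, Y
-- ===== SOURCE B (Python) =====
-- def create_samples(samples, cls, ordering):
--     # Inverted index: mac -> all its column positions in ordering (handles duplicates).
--     index = {}
--     for i, mac in enumerate(ordering):
--         index.setdefault(mac, []).append(i)
--     X = []
--     for sample in samples:
--         row = [0] * len(ordering)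
--         for network in sample:
--             for p in index.get(network['mac'], []):
--                 row[p] = 1
--         X.append(row)
--     return X, [cls] * len(samples)
-- ===== Notes on version B (the rewrite author's own statement) =====
-- stated objective: alternative
-- what changed: Replaces the per-sample membership scan over all of ordering with an inverted index mac->positions built once, a zero row per sample, and writes of 1 only at the positions of macs actually present; Y is built as [cls]*len(samples) instead of per-iteration appends.
import Mathlib
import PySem

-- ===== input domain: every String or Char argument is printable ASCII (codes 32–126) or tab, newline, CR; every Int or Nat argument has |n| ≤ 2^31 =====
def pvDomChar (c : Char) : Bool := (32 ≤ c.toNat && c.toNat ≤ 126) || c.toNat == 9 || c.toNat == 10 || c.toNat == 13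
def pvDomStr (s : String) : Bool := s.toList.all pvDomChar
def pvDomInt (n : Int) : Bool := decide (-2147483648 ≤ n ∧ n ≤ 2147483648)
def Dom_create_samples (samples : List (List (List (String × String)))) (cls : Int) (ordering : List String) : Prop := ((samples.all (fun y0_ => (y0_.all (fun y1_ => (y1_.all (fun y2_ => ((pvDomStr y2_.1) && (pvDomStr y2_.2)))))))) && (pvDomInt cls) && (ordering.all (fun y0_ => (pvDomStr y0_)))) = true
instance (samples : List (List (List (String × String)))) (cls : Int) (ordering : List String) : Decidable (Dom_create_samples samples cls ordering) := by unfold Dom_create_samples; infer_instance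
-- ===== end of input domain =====

-- B replaces A's per-sample membership scan of all of `ordering` by an inverted index
-- mac -> column positions built once, writing 1s only at positions of macs present in the
-- sample (objective: alternative algorithm; no speed claim).


-- ===== PORT A =====
-- network['mac']: total form via .getD "" — exact under Pre_ (every network carries key "mac";
-- Python raises KeyError otherwise, excluded by Pre_).
def pvMac (network : List (String × String)) : String :=
  ((PySem.Dict.mk network).get? "mac").getD ""

def create_samples (samples : List (List (List (String × String)))) (cls : Int) (ordering : List String) : List (List Int) × List Int :=
  samples.foldl
    (fun acc sample =>
      let sample_macs : PySem.Set String := PySem.Set.ofList (sample.map (fun network => pvMac network))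
      (acc.1 ++ [ordering.map (fun mac => if PySem.Set.contains sample_macs mac then (1 : Int) else 0)],
       acc.2 ++ [cls]))
    ([], [])

-- ===== PORT B =====
-- index.setdefault(mac, []).append(i) over enumerate(ordering)
def pvIndexB (ordering : List String) : PySem.Dict String (List Int) :=
  (PySem.List.enumerate ordering).foldl
    (fun d p => d.modify p.2 [] (fun l => l ++ [p.1])) PySem.Dict.empty

-- row[p] = 1 (p always in range by construction of the index)
def pvSetOnes (row : List Int) (ps : List Int) : List Int :=
  ps.foldl (fun r p => PySem.List.pySetD r p 1) row

def pvRowB (index : PySem.Dict String (List Int)) (n : Nat) (sample : List (List (String × String))) : List Int :=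
  sample.foldl (fun row network => pvSetOnes row (index.getD (pvMac network) [])) (List.replicate n 0)

def create_samples_alt (samples : List (List (List (String × String)))) (cls : Int) (ordering : List String) : List (List Int) × List Int :=
  let index := pvIndexB ordering
  (samples.map (fun sample => pvRowB index ordering.length sample),
   List.replicate samples.length cls)

-- ===== PRECONDITION & SPEC =====
-- Pre_ excludes exactly the inputs where A raises KeyError: some network without a "mac" key.
def Pre_create_samples (samples : List (List (List (String × String)))) (cls : Int) (ordering : List String) : Prop :=
  (samples.all (fun sample => sample.all (fun network => network.any (fun kv => kv.1 == "mac")))) = true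
instance (samples : List (List (List (String × String)))) (cls : Int) (ordering : List String) : Decidable (Pre_create_samples samples cls ordering) := by unfold Pre_create_samples; infer_instance

def pvWitness_create_samples : (List (List (List (String × String)))) × Int × List String :=
  ([[[("mac", "aa")], [("mac", "bb"), ("ch", "6")]], []], 1, ["aa", "cc", "aa"])

def Spec_create_samples (samples : List (List (List (String × String)))) (cls : Int) (ordering : List String) (out : List (List Int) × List Int) : Prop := out = create_samples_alt samples cls ordering
instance (samples : List (List (List (String × String)))) (cls : Int) (ordering : List String) (out : List (List Int) × List Int) : Decidable (Spec_create_samples samples cls ordering out) := by unfold Spec_create_samples; infer_instance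

-- ===== CLAIM (what is proved, stated in full; the proofs are below) =====
def Claim_equal_create_samples : Prop := ∀ (samples : List (List (List (String × String)))) (cls : Int) (ordering : List String), Dom_create_samples samples cls ordering → Pre_create_samples samples cls ordering → Spec_create_samples samples cls ordering (create_samples samples cls ordering)

-- ===== LEMMAS AND PROOFS =====

-- The inverted index maps m to exactly the positions of m in `ordering`, in order.
theorem pvIndexB_getD (ordering : List String) (m : String) :
    (pvIndexB ordering).getD m [] =
      ((PySem.List.enumerate ordering).filter (fun p => p.2 == m)).map (fun p => p.1) := by
  have h : pvIndexB ordering =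
      ((PySem.List.enumerate ordering).map (fun p => (p.2, p.1))).foldl
        (fun d p => d.modify p.1 [] (fun l => l ++ [p.2])) PySem.Dict.empty := by
    rw [List.foldl_map]; simp [pvIndexB]
  rw [h, PySem.Dict.getD_foldl_modify_append]
  simp [List.filter_map, List.map_map, Function.comp_def]

theorem mem_pvIndexB_getD (ordering : List String) (m : String) (p : Int) :
    p ∈ (pvIndexB ordering).getD m [] ↔
      ∃ (k : Nat) (h : k < ordering.length), p = (k : Int) ∧ ordering[k] = m := by
  rw [pvIndexB_getD]
  simp only [List.mem_map, List.mem_filter, PySem.List.mem_enumerate_iff]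
  constructor
  · rintro ⟨q, ⟨⟨k, hk, rfl⟩, hm⟩, rfl⟩
    refine ⟨k, hk, by simp, by simpa using hm⟩
  · rintro ⟨k, hk, rfl, hm⟩
    exact ⟨((k : Int), ordering[k]), ⟨⟨k, hk, by simp⟩, by simpa using hm⟩, rfl⟩

theorem length_pySetD (r : List Int) (p : Int) (v : Int) :
    (PySem.List.pySetD r p v).length = r.length := by
  simp [pysem]

theorem length_pvSetOnes (ps : List Int) (r : List Int) :
    (pvSetOnes r ps).length = r.length := by
  induction ps generalizing r with
  | nil => rfl
  | cons p t ih => simp only [pvSetOnes, List.foldl_cons] at *; rw [ih, length_pySetD]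

theorem pySetD_inrange (r : List Int) (p : Int) (v : Int) (h0 : 0 ≤ p) (h1 : p.toNat < r.length) :
    PySem.List.pySetD r p v = r.set p.toNat v := by
  obtain ⟨n, rfl⟩ : ∃ n : Nat, p = (n : Int) := ⟨p.toNat, (Int.toNat_of_nonneg h0).symm⟩
  rw [PySem.List.pySetD, PySem.List.pySet?_natCast r n v (by simpa using h1)]
  simp

theorem pvSetOnes_getElem? (ps : List Int) (r : List Int) (j : Nat)
    (hps : ∀ p ∈ ps, 0 ≤ p ∧ p.toNat < r.length) :
    (pvSetOnes r ps)[j]? = if (j : Int) ∈ ps then some 1 else r[j]? := by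
  induction ps generalizing r with
  | nil => simp [pvSetOnes]
  | cons p t ih =>
    obtain ⟨h0, h1⟩ := hps p (by simp)
    have hstep : pvSetOnes r (p :: t) = pvSetOnes (r.set p.toNat 1) t := by
      simp [pvSetOnes, pySetD_inrange r p 1 h0 h1]
    rw [hstep, ih _ (fun q hq => by
      have := hps q (by simp [hq]); simpa [List.length_set] using this)]
    by_cases hjt : (j : Int) ∈ t
    · simp [hjt]
    · by_cases hjp : (j : Int) = p
      · subst hjp
        have h1' : j < r.length := by simpa using h1
        simp [hjt, List.getElem?_set, h1']
      · have hj : p.toNat ≠ j := by omega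
        simp [hjt, hjp, List.getElem?_set, hj]

theorem length_pvRowB_foldl (ordering : List String) (sample : List (List (String × String))) (r : List Int) :
    (sample.foldl (fun row network => pvSetOnes row ((pvIndexB ordering).getD (pvMac network) [])) r).length = r.length := by
  induction sample generalizing r with
  | nil => rfl
  | cons nw t ih => rw [List.foldl_cons, ih, length_pvSetOnes]

theorem pvRowB_foldl_getElem? (ordering : List String) (sample : List (List (String × String)))
    (r : List Int) (hr : r.length = ordering.length) (j : Nat) :
    (sample.foldl (fun row network => pvSetOnes row ((pvIndexB ordering).getD (pvMac network) [])) r)[j]? =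
      if ∃ network ∈ sample, ordering[j]? = some (pvMac network) then some 1 else r[j]? := by
  induction sample generalizing r with
  | nil => simp
  | cons nw t ih =>
    have hps : ∀ p ∈ (pvIndexB ordering).getD (pvMac nw) [], 0 ≤ p ∧ p.toNat < r.length := by
      intro p hp
      obtain ⟨k, hk, rfl, -⟩ := (mem_pvIndexB_getD ordering (pvMac nw) p).mp hp
      constructor
      · exact Int.natCast_nonneg k
      · simpa [hr] using hk
    rw [List.foldl_cons, ih _ (by rw [length_pvSetOnes]; exact hr)]
    rw [pvSetOnes_getElem? _ _ _ hps]
    have hmem : ((j : Int) ∈ (pvIndexB ordering).getD (pvMac nw) []) ↔ ordering[j]? = some (pvMac nw) := by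
      rw [mem_pvIndexB_getD]
      constructor
      · rintro ⟨k, hk, hjk, hm⟩
        have : j = k := by omega
        subst this
        simp [List.getElem?_eq_getElem hk, hm]
      · intro h
        have hj : j < ordering.length := by
          by_contra hc
          simp [List.getElem?_eq_none (by omega : ordering.length ≤ j)] at h
        refine ⟨j, hj, rfl, ?_⟩
        simpa [List.getElem?_eq_getElem hj] using h
    by_cases ht : ∃ network ∈ t, ordering[j]? = some (pvMac network)
    · simp [ht]
    · simp only [if_neg ht]
      by_cases hnw : ordering[j]? = some (pvMac nw)
      · rw [if_pos (hmem.mpr hnw), if_pos ⟨nw, by simp, hnw⟩]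
      · rw [if_neg (fun h => hnw (hmem.mp h)), if_neg (by
          rintro ⟨x, hx, hox⟩
          rcases List.mem_cons.mp hx with rfl | hxt
          · exact hnw hox
          · exact ht ⟨x, hxt, hox⟩)]

theorem pvRowB_eq_rowA (ordering : List String) (sample : List (List (String × String))) :
    pvRowB (pvIndexB ordering) ordering.length sample =
      ordering.map (fun mac =>
        if PySem.Set.contains (PySem.Set.ofList (sample.map (fun network => pvMac network))) mac then (1 : Int) else 0) := by
  apply List.ext_getElem?
  intro j
  have hlen : (pvRowB (pvIndexB ordering) ordering.length sample).length = ordering.length := by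
    unfold pvRowB; rw [length_pvRowB_foldl]; simp
  by_cases hj : j < ordering.length
  · unfold pvRowB
    rw [pvRowB_foldl_getElem? ordering sample _ (by simp) j, List.getElem?_map]
    by_cases hex : ∃ network ∈ sample, ordering[j]? = some (pvMac network)
    · rw [if_pos hex]
      obtain ⟨nw, hnw, hox⟩ := hex
      rw [List.getElem?_eq_getElem hj] at hox ⊢
      simp
      exact ⟨nw, hnw, (Option.some.inj hox).symm⟩
    · rw [if_neg hex, List.getElem?_eq_getElem hj]
      have hrep : (List.replicate ordering.length (0 : Int))[j]? = some 0 := by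
        simp [hj]
      rw [hrep]
      simp
      intro x hx h
      exact hex ⟨x, hx, by simp [List.getElem?_eq_getElem hj, h]⟩
  · have h1 : (pvRowB (pvIndexB ordering) ordering.length sample)[j]? = none :=
      List.getElem?_eq_none (by rw [hlen]; omega)
    have h2 : (ordering.map (fun mac =>
        if PySem.Set.contains (PySem.Set.ofList (sample.map (fun network => pvMac network))) mac then (1 : Int) else 0))[j]? = none :=
      List.getElem?_eq_none (by simp; omega)
    rw [h1, h2]

theorem create_samples_foldl_shape (samples : List (List (List (String × String)))) (cls : Int) (ordering : List String)
    (xs : List (List Int)) (ys : List Int) :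
    samples.foldl
      (fun acc sample =>
        let sample_macs : PySem.Set String := PySem.Set.ofList (sample.map (fun network => pvMac network))
        (acc.1 ++ [ordering.map (fun mac => if PySem.Set.contains sample_macs mac then (1 : Int) else 0)],
         acc.2 ++ [cls]))
      (xs, ys) =
    (xs ++ samples.map (fun sample =>
        ordering.map (fun mac =>
          if PySem.Set.contains (PySem.Set.ofList (sample.map (fun network => pvMac network))) mac then (1 : Int) else 0)),
     ys ++ List.replicate samples.length cls) := by
  induction samples generalizing xs ys with
  | nil => simp
  | cons s t ih =>
    rw [List.foldl_cons, ih]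
    have h : cls :: List.replicate t.length cls = List.replicate t.length cls ++ [cls] := by
      rw [← List.replicate_succ, List.replicate_succ']
    simp [List.replicate_succ, h]

-- ===== VERDICT (by name: the statement is the Claim_ definition above) =====
theorem create_samples_spec : Claim_equal_create_samples := by
  intro samples cls ordering _ _
  unfold Spec_create_samples create_samples create_samples_alt
  rw [create_samples_foldl_shape]
  simp only [List.nil_append]
  refine Prod.ext ?_ rfl
  simp only [List.map_inj_left]
  intro sample _
  exact (pvRowB_eq_rowA ordering sample).symm
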